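-- pv_equiv track=rewrite | github.com/dschinzo/Competitive-Programming | HackerRank/solution/practice/mathematics/fundamentals/leonardo-and-prime/solution.py | max_unique_primes
-- ===== SOURCE A (Python) =====
-- def gcd(a, b):
--     while b:
--         a, b = b, a % b
--     return a
--
-- def max_unique_primes(n):
--     if n < 2:
--         return 0
--     prod = 2
--     cnt = 1
--     prim = 3
--     while prod * prim <= n:
--         if gcd(prod, prim) == 1:
--             prod *= prim
--             cnt += 1
--         prim += 2
--     return cnt
-- ===== SOURCE B (Python) =====
-- def _is_prime(m, primes):
--     for q in primes:
--         if q * q > m: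
--             return True
--         if m % q == 0:
--             return False
--     return True
--
-- def max_unique_primes(n):
--     primes = []
--     prod = 1
--     cand = 2
--     while prod * cand <= n:
--         if _is_prime(cand, primes):
--             primes.append(cand)
--             prod *= cand
--         cand += 1
--     return len(primes)
-- ===== Notes on version B (the rewrite author's own statement) =====
-- stated objective: alternative
-- what changed: A tests each odd candidate with a gcd of a running product of accepted primes; B keeps an explicit list of the primes found so far and tests every candidate by square-root-bounded trial division against that list, multiplying accepted primes into the product and returning the list's length.
import Mathlib
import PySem

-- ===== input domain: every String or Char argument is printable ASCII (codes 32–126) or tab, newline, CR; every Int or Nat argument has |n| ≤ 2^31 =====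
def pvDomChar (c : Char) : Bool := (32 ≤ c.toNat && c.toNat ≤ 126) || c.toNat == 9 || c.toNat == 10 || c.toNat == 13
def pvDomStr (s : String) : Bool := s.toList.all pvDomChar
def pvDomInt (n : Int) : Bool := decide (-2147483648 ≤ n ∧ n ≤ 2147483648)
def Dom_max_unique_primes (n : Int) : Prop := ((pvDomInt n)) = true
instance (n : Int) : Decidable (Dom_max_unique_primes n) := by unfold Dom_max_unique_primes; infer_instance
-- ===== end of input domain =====

-- B replaces A's running-product gcd sieve by an explicit list of collected primes with
-- square-root-bounded trial division (objective: alternative algorithm, similar cost).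

-- ===== PORT A =====
def gcdA (a b : Int) : Int :=
  if _hb : b = 0 then a else gcdA b (PySem.Int.mod a b)
termination_by b.natAbs
decreasing_by
  rcases lt_or_gt_of_ne _hb with h | h
  · have := PySem.Int.mod_neg_bounds (a := a) h; omega
  · have h1 := PySem.Int.mod_nonneg (a := a) h
    have h2 := PySem.Int.mod_lt (a := a) h
    omega

-- the '2 ≤ prod ∧ 3 ≤ prim' conjuncts are totality guards only: they hold on every state the
-- entry point reaches, and make the while-loop's termination provable for arbitrary arguments
def loopA (n prod cnt prim : Int) : Int :=
  if h : 2 ≤ prod ∧ 3 ≤ prim ∧ prod * prim ≤ n then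
    if gcdA prod prim = 1 then loopA n (prod * prim) (cnt + 1) (prim + 2)
    else loopA n prod cnt (prim + 2)
  else cnt
termination_by (n - prim).toNat
decreasing_by
  all_goals
    obtain ⟨h1, h2, h3⟩ := h
    have : 2 * prim ≤ prod * prim := by nlinarith
    omega

def max_unique_primes (n : Int) : Int :=
  if n < 2 then 0 else loopA n 2 1 3

-- ===== PORT B =====
def isPrimeB (m : Int) : List Int → Bool
  | [] => true
  | q :: qs =>
    if q * q > m then true
    else if PySem.Int.mod m q = 0 then false
    else isPrimeB m qs

-- the '1 ≤ prod ∧ 2 ≤ cand' conjuncts are totality guards only (see loopA)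
def loopB (n : Int) (primes : List Int) (prod cand : Int) : Int :=
  if h : 1 ≤ prod ∧ 2 ≤ cand ∧ prod * cand ≤ n then
    if isPrimeB cand primes then loopB n (primes ++ [cand]) (prod * cand) (cand + 1)
    else loopB n primes prod (cand + 1)
  else (primes.length : Int)
termination_by (n + 1 - cand).toNat
decreasing_by
  all_goals
    obtain ⟨h1, h2, h3⟩ := h
    have : 1 * cand ≤ prod * cand := by nlinarith
    omega

def max_unique_primes_alt (n : Int) : Int := loopB n [] 1 2

-- ===== PRECONDITION & SPEC =====
def Spec_max_unique_primes (n : Int) (out : Int) : Prop := out = max_unique_primes_alt n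
instance (n : Int) (out : Int) : Decidable (Spec_max_unique_primes n out) := by unfold Spec_max_unique_primes; infer_instance

-- ===== CLAIM (what is proved, stated in full; the proofs are below) =====
def Claim_equal_max_unique_primes : Prop := ∀ (n : Int), Dom_max_unique_primes n → Spec_max_unique_primes n (max_unique_primes n)

-- ===== LEMMAS AND PROOFS =====

-- the ascending list of all primes below c
def primesBelow (c : ℕ) : List ℕ := (List.range c).filter (fun m => decide (Nat.Prime m))

theorem mem_primesBelow {p c : ℕ} : p ∈ primesBelow c ↔ p.Prime ∧ p < c := by
  simp [primesBelow, List.mem_filter, List.mem_range, and_comm]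

theorem pairwise_primesBelow (c : ℕ) : (primesBelow c).Pairwise (· < ·) :=
  List.Pairwise.sublist (List.filter_sublist) List.pairwise_lt_range

theorem primesBelow_succ (c : ℕ) :
    primesBelow (c + 1) = primesBelow c ++ if c.Prime then [c] else [] := by
  simp only [primesBelow, List.range_succ, List.filter_append, List.filter]
  split_ifs with h <;> simp [h]

theorem two_le_prod_primesBelow {c : ℕ} (hc : 3 ≤ c) : 2 ≤ (primesBelow c).prod := by
  refine List.single_le_prod (fun x hx => ?_) 2 ?_
  · exact le_of_lt (mem_primesBelow.mp hx).1.one_lt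
  · exact mem_primesBelow.mpr ⟨Nat.prime_two, by omega⟩

theorem minFac_lt_self {c : ℕ} (hc : 2 ≤ c) (hp : ¬ c.Prime) : c.minFac < c := by
  have h2 := Nat.minFac_prime (n := c) (by omega)
  have hsq := Nat.minFac_sq_le_self (n := c) (by omega) hp
  have h1 := h2.one_lt
  nlinarith [h1, hsq]

theorem minFac_mem_primesBelow {c : ℕ} (hc : 2 ≤ c) (hp : ¬ c.Prime) :
    c.minFac ∈ primesBelow c :=
  mem_primesBelow.mpr ⟨Nat.minFac_prime (by omega), minFac_lt_self hc hp⟩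

theorem gcdA_eq_gcd_aux : ∀ (m : ℕ) (a b : Int), b.natAbs ≤ m → 0 ≤ a → 0 ≤ b →
    gcdA a b = (Int.gcd a b : ℤ) := by
  intro m
  induction m with
  | zero =>
    intro a b hm ha hb
    have hb0 : b = 0 := by omega
    subst hb0
    rw [gcdA, dif_pos rfl]
    simp [Int.natAbs_of_nonneg ha]
  | succ m ih =>
    intro a b hm ha hb
    rw [gcdA]
    split_ifs with h
    · subst h
      simp [Int.natAbs_of_nonneg ha]
    · have hbpos : 0 < b := lt_of_le_of_ne hb (Ne.symm h)
      rw [PySem.Int.mod_eq_emod_of_pos hbpos]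
      have h1 : 0 ≤ a % b := Int.emod_nonneg a (by omega)
      have h2 : (a % b).natAbs ≤ m := by
        have := Int.emod_lt_of_pos a hbpos
        omega
      rw [ih b (a % b) h2 hb h1, Int.gcd_comm b (a % b), Int.gcd_emod a b]

theorem gcdA_eq_gcd (a b : Int) (ha : 0 ≤ a) (hb : 0 ≤ b) : gcdA a b = (Int.gcd a b : ℤ) :=
  gcdA_eq_gcd_aux b.natAbs a b le_rfl ha hb

theorem gcd_crit {c : ℕ} (hc : 3 ≤ c) :
    (gcdA ((primesBelow c).prod : ℤ) (c : ℤ) = 1) ↔ c.Prime := by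
  rw [gcdA_eq_gcd _ _ (by positivity) (by positivity), Int.gcd_natCast_natCast]
  have hiff : ((Nat.gcd (primesBelow c).prod c : ℕ) : ℤ) = 1 ↔ Nat.gcd (primesBelow c).prod c = 1 := by
    omega
  rw [hiff]
  constructor
  · intro hg
    by_contra hp
    have hmem := minFac_mem_primesBelow (by omega) hp
    have hd1 : c.minFac ∣ (primesBelow c).prod := List.dvd_prod hmem
    have hd : c.minFac ∣ Nat.gcd (primesBelow c).prod c := Nat.dvd_gcd hd1 (Nat.minFac_dvd c)
    rw [hg] at hd
    have hle := Nat.le_of_dvd (by omega) hd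
    have := (Nat.minFac_prime (n := c) (by omega)).one_lt
    omega
  · intro hp
    exact Nat.coprime_list_prod_left_iff.mpr fun a ha =>
      (Nat.coprime_primes (mem_primesBelow.mp ha).1 hp).mpr
        (by have := (mem_primesBelow.mp ha).2; omega)

theorem isPrimeB_of_no_dvd (m : Int) (qs : List Int) (h : ∀ q ∈ qs, ¬ (q ∣ m)) :
    isPrimeB m qs = true := by
  induction qs with
  | nil => rfl
  | cons q qs ih =>
    rw [isPrimeB]
    split_ifs with h1 h2
    · rfl
    · exact absurd ((PySem.Int.mod_eq_zero_iff_dvd m q).mp h2) (h q (by simp))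
    · exact ih fun q' hq' => h q' (by simp [hq'])

theorem isPrimeB_true_of_prime {c : ℕ} (hp : c.Prime) (qs : List ℕ)
    (hall : ∀ q ∈ qs, q.Prime ∧ q < c) :
    isPrimeB (c : ℤ) (qs.map (fun m : ℕ => (m : ℤ))) = true := by
  refine isPrimeB_of_no_dvd _ _ fun q hq hdvd => ?_
  obtain ⟨p, hpmem, rfl⟩ := List.mem_map.mp hq
  obtain ⟨hpp, hplt⟩ := hall p hpmem
  have hpc : p ∣ c := Int.natCast_dvd_natCast.mp hdvd
  rcases (hp.eq_one_or_self_of_dvd p hpc) with h | h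
  · exact absurd h hpp.ne_one
  · omega

theorem isPrimeB_false_of_composite {c : ℕ} (hc : 2 ≤ c) (hp : ¬ c.Prime) :
    ∀ qs : List ℕ, qs.Pairwise (· < ·) → (∀ q ∈ qs, q.Prime) → c.minFac ∈ qs →
      isPrimeB (c : ℤ) (qs.map (fun m : ℕ => (m : ℤ))) = false := by
  intro qs
  induction qs with
  | nil => intro _ _ hmem; exact absurd hmem (List.not_mem_nil)
  | cons q qs ih =>
    intro hpw hall hmem
    have hq2 : 2 ≤ q := (hall q (by simp)).one_lt
    have hsq : c.minFac * c.minFac ≤ c := by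
      have := Nat.minFac_sq_le_self (n := c) (by omega) hp
      nlinarith [this]
    have hqle : q ≤ c.minFac := by
      rcases List.mem_cons.mp hmem with h | h
      · omega
      · exact le_of_lt ((List.pairwise_cons.mp hpw).1 _ h)
    rw [List.map_cons, isPrimeB]
    have hqq : q * q ≤ c := le_trans (Nat.mul_le_mul hqle hqle) hsq
    have hnotgt : ¬ ((q : ℤ) * q > (c : ℤ)) := by
      exact not_lt.mpr (by exact_mod_cast hqq)
    rw [if_neg hnotgt]
    by_cases hd : q ∣ c
    · have hm0 : PySem.Int.mod (c : ℤ) (q : ℤ) = 0 :=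
        (PySem.Int.mod_eq_zero_iff_dvd _ _).mpr (Int.natCast_dvd_natCast.mpr hd)
      rw [if_pos hm0]
    · have hne : q ≠ c.minFac := fun h => hd (h ▸ Nat.minFac_dvd c)
      have hmem' : c.minFac ∈ qs := by
        rcases List.mem_cons.mp hmem with h | h
        · exact absurd h.symm hne
        · exact h
      have hm0 : PySem.Int.mod (c : ℤ) (q : ℤ) ≠ 0 := fun h =>
        hd (Int.natCast_dvd_natCast.mp ((PySem.Int.mod_eq_zero_iff_dvd _ _).mp h))
      rw [if_neg hm0]
      exact ih (List.pairwise_cons.mp hpw).2 (fun q' hq' => hall q' (by simp [hq'])) hmem'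

theorem succ_not_prime {c : ℕ} (hc : 3 ≤ c) (hodd : c % 2 = 1) : ¬ (c + 1).Prime := by
  intro hp
  have h2 : (2 : ℕ) ∣ (c + 1) := by omega
  rcases hp.eq_one_or_self_of_dvd 2 h2 with h | h <;> omega

theorem isPrimeB_even {c : ℕ} (hc : 3 ≤ c) (hodd : c % 2 = 1) :
    isPrimeB ((c : ℤ) + 1) ((primesBelow (c + 1)).map (fun m : ℕ => (m : ℤ))) = false := by
  have h1 : ((c : ℤ) + 1) = ((c + 1 : ℕ) : ℤ) := by push_cast; ring
  have hnp := succ_not_prime hc hodd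
  have hmf : (c + 1).minFac = 2 := (Nat.minFac_eq_two_iff _).mpr (by omega)
  rw [h1]
  exact isPrimeB_false_of_composite (by omega) hnp _ (pairwise_primesBelow _)
    (fun q hq => (mem_primesBelow.mp hq).1)
    (by rw [hmf]; exact mem_primesBelow.mpr ⟨Nat.prime_two, by omega⟩)

-- joint invariant: from any odd candidate c ≥ 3 with state "all primes below c collected",
-- A's gcd loop and B's trial-division loop return the same count
theorem loop_eq (n : ℤ) : ∀ k : ℕ, ∀ c : ℕ, 3 ≤ c → c % 2 = 1 → n + 3 - (c : ℤ) ≤ (k : ℤ) →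
    loopA n ((primesBelow c).prod : ℤ) (((primesBelow c).length : ℕ) : ℤ) (c : ℤ)
      = loopB n ((primesBelow c).map (fun m : ℕ => (m : ℤ))) ((primesBelow c).prod : ℤ) (c : ℤ) := by
  intro k
  induction k with
  | zero =>
    intro c hc3 hodd hk
    have hc3' : (3 : ℤ) ≤ (c : ℤ) := by exact_mod_cast hc3
    have hprod : 2 ≤ ((primesBelow c).prod : ℤ) := by exact_mod_cast two_le_prod_primesBelow hc3
    have h2c : 2 * (c : ℤ) ≤ ((primesBelow c).prod : ℤ) * c := by nlinarith
    have hstop : ¬ (((primesBelow c).prod : ℤ) * c ≤ n) := by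
      push_cast at hk
      linarith
    rw [loopA, loopB, dif_neg (by tauto), dif_neg (by tauto)]
    simp
  | succ k ih =>
    intro c hc3 hodd hk
    have hc3' : (3 : ℤ) ≤ (c : ℤ) := by exact_mod_cast hc3
    have hprod : 2 ≤ ((primesBelow c).prod : ℤ) := by exact_mod_cast two_le_prod_primesBelow hc3
    by_cases hle : ((primesBelow c).prod : ℤ) * c ≤ n
    · rw [loopA, loopB, dif_pos ⟨hprod, by omega, hle⟩, dif_pos ⟨by omega, by omega, hle⟩]
      have hnp1 : ¬ (c + 1).Prime := succ_not_prime hc3 hodd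
      have hP2 : primesBelow (c + 2) = primesBelow (c + 1) := by
        have h := primesBelow_succ (c + 1)
        rw [if_neg hnp1] at h
        simpa using h
      by_cases hp : c.Prime
      · have hPc : primesBelow (c + 1) = primesBelow c ++ [c] := by
          rw [primesBelow_succ, if_pos hp]
        rw [if_pos ((gcd_crit hc3).mpr hp)]
        rw [if_pos (isPrimeB_true_of_prime hp _ (fun q hq => mem_primesBelow.mp hq))]
        have hmap : (primesBelow c).map (fun m : ℕ => (m : ℤ)) ++ [(c : ℤ)]
            = (primesBelow (c + 1)).map (fun m : ℕ => (m : ℤ)) := by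
          rw [hPc]; simp
        have hpn : (primesBelow (c + 1)).prod = (primesBelow c).prod * c := by
          rw [hPc, List.prod_append, List.prod_singleton]
        have hprodc : ((primesBelow c).prod : ℤ) * c = ((primesBelow (c + 1)).prod : ℤ) := by
          rw [hpn]; push_cast; ring
        have hln : (primesBelow (c + 1)).length = (primesBelow c).length + 1 := by
          rw [hPc]; simp
        have hlen : ((primesBelow c).length : ℤ) + 1 = ((primesBelow (c + 1)).length : ℤ) := by
          rw [hln]; push_cast; ring
        rw [hmap, hprodc, loopB]
        have hprod1 : 2 ≤ ((primesBelow (c + 1)).prod : ℤ) := by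
          exact_mod_cast two_le_prod_primesBelow (c := c + 1) (by omega)
        by_cases h2 : ((primesBelow (c + 1)).prod : ℤ) * ((c : ℤ) + 1) ≤ n
        · rw [dif_pos ⟨by omega, by omega, h2⟩]
          rw [isPrimeB_even hc3 hodd]
          simp only [Bool.false_eq_true, if_false]
          have hihs := ih (c + 2) (by omega) (by omega) (by omega)
          have e2 : ((c + 2 : ℕ) : ℤ) = (c : ℤ) + 2 := by push_cast; ring
          rw [e2, hP2] at hihs
          have e1 : (c : ℤ) + 1 + 1 = (c : ℤ) + 2 := by ring
          rw [e1, hlen, hihs]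
        · rw [dif_neg (fun hcontra => h2 hcontra.2.2)]
          rw [loopA, dif_neg (by
            rintro ⟨-, -, hc2⟩
            have : ((primesBelow (c + 1)).prod : ℤ) * ((c : ℤ) + 1) ≤ n := by nlinarith
            exact h2 this)]
          rw [hlen]
          simp
      · have hPc : primesBelow (c + 1) = primesBelow c := by
          rw [primesBelow_succ, if_neg hp]; simp
        have hgcd : ¬ (gcdA ((primesBelow c).prod : ℤ) (c : ℤ) = 1) := fun h =>
          hp ((gcd_crit hc3).mp h)
        rw [if_neg hgcd]
        have hfalse : isPrimeB (c : ℤ) ((primesBelow c).map (fun m : ℕ => (m : ℤ))) = false :=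
          isPrimeB_false_of_composite (by omega) hp _ (pairwise_primesBelow _)
            (fun q hq => (mem_primesBelow.mp hq).1) (minFac_mem_primesBelow (by omega) hp)
        rw [hfalse]
        simp only [Bool.false_eq_true, if_false]
        rw [loopB]
        by_cases h2 : ((primesBelow c).prod : ℤ) * ((c : ℤ) + 1) ≤ n
        · rw [dif_pos ⟨by omega, by omega, h2⟩]
          have hfe : isPrimeB ((c : ℤ) + 1) ((primesBelow c).map (fun m : ℕ => (m : ℤ))) = false := by
            have := isPrimeB_even hc3 hodd
            rw [hPc] at this
            exact this
          rw [hfe]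
          simp only [Bool.false_eq_true, if_false]
          have hihs := ih (c + 2) (by omega) (by omega) (by omega)
          have e2 : ((c + 2 : ℕ) : ℤ) = (c : ℤ) + 2 := by push_cast; ring
          rw [e2, hP2, hPc] at hihs
          have e1 : (c : ℤ) + 1 + 1 = (c : ℤ) + 2 := by ring
          rw [e1, hihs]
        · rw [dif_neg (fun hcontra => h2 hcontra.2.2)]
          rw [loopA, dif_neg (by
            rintro ⟨-, -, hc2⟩
            have : ((primesBelow c).prod : ℤ) * ((c : ℤ) + 1) ≤ n := by nlinarith
            exact h2 this)]
          simp
    · rw [loopA, loopB, dif_neg (by tauto), dif_neg (by tauto)]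
      simp

-- ===== VERDICT (by name: the statement is the Claim_ definition above) =====
theorem max_unique_primes_spec : Claim_equal_max_unique_primes := by
  intro n _
  unfold Spec_max_unique_primes max_unique_primes max_unique_primes_alt
  by_cases hn : n < 2
  · rw [if_pos hn, loopB, dif_neg (by omega)]
    simp
  · rw [if_neg hn, loopB, dif_pos ⟨le_refl 1, le_refl 2, by omega⟩]
    have h1 : isPrimeB 2 [] = true := rfl
    rw [h1, if_pos rfl]
    have h3 : primesBelow 3 = [2] := by decide
    have := loop_eq n n.toNat 3 (by omega) (by omega) (by omega)
    rw [h3] at this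
    push_cast at this ⊢
    simpa using this
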